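-- pv_equiv track=rewrite | github.com/acabr017/AdventOfCode2023 | day3_part1.py | element_finder
-- ===== SOURCE A (Python) =====
-- master_symbols = ["-", "=", "%", "*", "#", "$", "&", "@", "/", "+"]
--
-- def element_finder(line):
--     numbers = {}
--     symbols = {}
--     coords = []
--     current_number = ""
--     for i, char in enumerate(line.strip()):
--         if char.isdigit():
--             current_number += char
--             coords.append(i)
--             if i == len(line.strip()) - 1:
--                 try:
--                     numbers[current_number].append(coords)
--                 except KeyError:
--                     numbers[current_number] = []
--                     numbers[current_number].append(coords)
--         elif char.isdigit() is False and len(current_number) != 0: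
--             try:
--                 numbers[current_number].append(coords)
--             except KeyError:
--                 numbers[current_number] = []
--                 numbers[current_number].append(coords)
--             current_number = ""
--             coords = []
--         if char in master_symbols:
--             try:
--                 symbols[char].append(i)
--             except KeyError:
--                 symbols[char] = [i]
--
--     return numbers, symbols
-- ===== SOURCE B (Python) =====
-- master_symbols = ["-", "=", "%", "*", "#", "$", "&", "@", "/", "+"]
--
-- def element_finder(line):
--     s = line.strip()
--     n = len(s)
--     numbers = {}
--     i = 0
--     while i < n:
--         if s[i].isdigit():
--             j = i
--             while j < n and s[j].isdigit():
--                 j += 1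
--             numbers.setdefault(s[i:j], []).append(list(range(i, j)))
--             i = j
--         else:
--             i += 1
--     symbols = {}
--     for i, c in enumerate(s):
--         if c in master_symbols:
--             symbols.setdefault(c, []).append(i)
--     return numbers, symbols
-- ===== Notes on version B (the rewrite author's own statement) =====
-- stated objective: simpler
-- what changed: A's single pass with a carried current_number/coords accumulator flushed at non-digits or at the last index is replaced by a two-pointer scan that slices out each maximal digit run whole (number string and its range of indices in one step), with the symbol collection done in a separate independent pass.
import Mathlib
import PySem

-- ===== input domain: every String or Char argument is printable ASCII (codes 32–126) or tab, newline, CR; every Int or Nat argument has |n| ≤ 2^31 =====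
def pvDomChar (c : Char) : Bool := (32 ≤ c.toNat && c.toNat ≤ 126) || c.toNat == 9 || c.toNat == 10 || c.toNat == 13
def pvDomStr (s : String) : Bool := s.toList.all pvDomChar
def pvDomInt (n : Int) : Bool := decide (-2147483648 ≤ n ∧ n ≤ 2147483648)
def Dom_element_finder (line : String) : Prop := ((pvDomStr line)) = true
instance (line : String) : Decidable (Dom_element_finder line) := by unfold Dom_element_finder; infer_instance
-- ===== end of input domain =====

-- B replaces A's char-by-char accumulator pass (current_number/coords carried through one combined
-- loop, flushed at non-digits or at the last index) by a two-pointer scan over whole digit runs plus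
-- a separate symbol pass; objective: simpler. Same return value; no argument is mutated.

-- ===== PORT A =====
-- Python strings are ported through List Char; the 1-char Python string handed out by the loop is String.ofList [c].
def masterSymbols : List String := ["-", "=", "%", "*", "#", "$", "&", "@", "/", "+"]

-- one iteration of A's loop body; n = len(line.strip()); state = (numbers, symbols, coords, current_number)
def aStep (n : Int)
    (st : PySem.Dict String (List (List Int)) × PySem.Dict String (List Int) × List Int × List Char)
    (p : Int × Char) :
    PySem.Dict String (List (List Int)) × PySem.Dict String (List Int) × List Int × List Char :=
  let numbers := st.1
  let symbols := st.2.1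
  let coords := st.2.2.1
  let cur := st.2.2.2
  let nck :=
    if PySem.Chars.isdigit p.2 then
      let cur' := cur ++ [p.2]
      let coords' := coords ++ [p.1]
      if p.1 = n - 1 then
        (numbers.modify (String.ofList cur') [] (· ++ [coords']), coords', cur')
      else (numbers, coords', cur')
    else if cur.length ≠ 0 then
      (numbers.modify (String.ofList cur) [] (· ++ [coords]), ([] : List Int), ([] : List Char))
    else (numbers, coords, cur)
  let symbols' := if String.ofList [p.2] ∈ masterSymbols then symbols.modify (String.ofList [p.2]) [] (· ++ [p.1]) else symbols
  (nck.1, symbols', nck.2.1, nck.2.2)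

def element_finder (line : String) : (List (String × List (List Int))) × (List (String × List Int)) :=
  let s := PySem.Chars.strip line.toList
  let st := (PySem.List.enumerate s 0).foldl (aStep (s.length : Int))
    (PySem.Dict.empty, PySem.Dict.empty, ([] : List Int), ([] : List Char))
  (st.1.items, st.2.1.items)

-- ===== PORT B =====
-- the while-loop of Source B: scan for the next digit run, record it whole, jump past it
def bNumsLoop (nums : PySem.Dict String (List (List Int))) : List Char → Int → PySem.Dict String (List (List Int))
  | [], _ => nums
  | c :: rest, i =>
    if h : PySem.Chars.isdigit c then
      let run := (c :: rest).takeWhile PySem.Chars.isdigit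
      bNumsLoop (nums.modify (String.ofList run) [] (· ++ [PySem.List.pyRange i (i + run.length) 1]))
        ((c :: rest).dropWhile PySem.Chars.isdigit) (i + run.length)
    else bNumsLoop nums rest (i + 1)
termination_by s _ => s.length
decreasing_by
  · simp only [List.dropWhile_cons_of_pos h]
    exact Nat.lt_succ_of_le (List.length_dropWhile_le _ _)
  · simp

def element_finder_alt (line : String) : (List (String × List (List Int))) × (List (String × List Int)) :=
  let s := PySem.Chars.strip line.toList
  let numbers := bNumsLoop PySem.Dict.empty s 0
  let symbols := (PySem.List.enumerate s 0).foldl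
    (fun (d : PySem.Dict String (List Int)) p =>
      if String.ofList [p.2] ∈ masterSymbols then d.modify (String.ofList [p.2]) [] (· ++ [p.1]) else d)
    PySem.Dict.empty
  (numbers.items, symbols.items)

-- ===== PRECONDITION & SPEC =====
def Spec_element_finder (line : String) (out : (List (String × List (List Int))) × (List (String × List Int))) : Prop := out = element_finder_alt line
instance (line : String) (out : (List (String × List (List Int))) × (List (String × List Int))) : Decidable (Spec_element_finder line out) := by unfold Spec_element_finder; infer_instance

-- ===== CLAIM (what is proved, stated in full; the proofs are below) =====
def Claim_equal_element_finder : Prop := ∀ (line : String), Dom_element_finder line → Spec_element_finder line (element_finder line)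

-- ===== LEMMAS AND PROOFS =====

-- unfolding equations for bNumsLoop
lemma bNumsLoop_nil (nums : PySem.Dict String (List (List Int))) (i : Int) :
    bNumsLoop nums [] i = nums := by rw [bNumsLoop]

lemma bNumsLoop_cons_digit (nums : PySem.Dict String (List (List Int))) (c : Char) (rest : List Char)
    (i : Int) (h : PySem.Chars.isdigit c) :
    bNumsLoop nums (c :: rest) i =
      bNumsLoop (nums.modify (String.ofList ((c :: rest).takeWhile PySem.Chars.isdigit)) []
          (· ++ [PySem.List.pyRange i (i + ((c :: rest).takeWhile PySem.Chars.isdigit).length) 1]))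
        ((c :: rest).dropWhile PySem.Chars.isdigit)
        (i + ((c :: rest).takeWhile PySem.Chars.isdigit).length) := by
  rw [bNumsLoop]; simp [h]

lemma bNumsLoop_cons_not (nums : PySem.Dict String (List (List Int))) (c : Char) (rest : List Char)
    (i : Int) (h : ¬ PySem.Chars.isdigit c) :
    bNumsLoop nums (c :: rest) i = bNumsLoop nums rest (i + 1) := by
  rw [bNumsLoop]; simp [h]

-- the numbers/coords/cur part of A's loop body, in isolation
def aStepN (n : Int)
    (st : PySem.Dict String (List (List Int)) × List Int × List Char) (p : Int × Char) :
    PySem.Dict String (List (List Int)) × List Int × List Char :=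
  if PySem.Chars.isdigit p.2 then
    let cur' := st.2.2 ++ [p.2]
    let coords' := st.2.1 ++ [p.1]
    if p.1 = n - 1 then
      (st.1.modify (String.ofList cur') [] (· ++ [coords']), coords', cur')
    else (st.1, coords', cur')
  else if st.2.2.length ≠ 0 then
    (st.1.modify (String.ofList st.2.2) [] (· ++ [st.2.1]), ([] : List Int), ([] : List Char))
  else st

-- the symbols part of A's loop body, in isolation (identical to B's symbol pass body)
def aStepS (d : PySem.Dict String (List Int)) (p : Int × Char) : PySem.Dict String (List Int) :=
  if String.ofList [p.2] ∈ masterSymbols then d.modify (String.ofList [p.2]) [] (· ++ [p.1]) else d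

-- one step of A's loop is the pair of its numbers-step and its symbols-step
lemma aStep_eq (n : Int) (nums : PySem.Dict String (List (List Int)))
    (syms : PySem.Dict String (List Int)) (coords : List Int) (cur : List Char) (p : Int × Char) :
    aStep n (nums, syms, coords, cur) p =
      ((aStepN n (nums, coords, cur) p).1, aStepS syms p,
       (aStepN n (nums, coords, cur) p).2.1, (aStepN n (nums, coords, cur) p).2.2) := by
  dsimp only [aStep, aStepN, aStepS]

-- A's combined fold splits into the two independent folds
lemma aFold_split (n : Int) (l : List (Int × Char)) (nums : PySem.Dict String (List (List Int)))
    (syms : PySem.Dict String (List Int)) (coords : List Int) (cur : List Char) :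
    l.foldl (aStep n) (nums, syms, coords, cur) =
      ((l.foldl (aStepN n) (nums, coords, cur)).1,
       l.foldl aStepS syms,
       (l.foldl (aStepN n) (nums, coords, cur)).2) := by
  induction l generalizing nums syms coords cur with
  | nil => rfl
  | cons p l ih =>
    simp only [List.foldl_cons, aStep_eq]
    rw [ih]

-- a digit run strictly before the last index just accumulates coords and current_number
lemma aFoldN_run (n : Int) (ds : List Char) (hds : ∀ c ∈ ds, PySem.Chars.isdigit c)
    (i : Int) (hlt : i + ds.length < n)
    (nums : PySem.Dict String (List (List Int))) (coords : List Int) (cur : List Char) :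
    (PySem.List.enumerate ds i).foldl (aStepN n) (nums, coords, cur) =
      (nums, coords ++ PySem.List.pyRange i (i + ds.length) 1, cur ++ ds) := by
  induction ds generalizing i coords cur with
  | nil => simp [PySem.List.enumerate_nil]
  | cons d ds ih =>
    have hd : PySem.Chars.isdigit d := hds d (by simp)
    simp only [PySem.List.enumerate_cons, List.foldl_cons]
    have hne : ¬ ((i : Int) = n - 1) := by simp only [List.length_cons] at hlt; push_cast at hlt; omega
    rw [show aStepN n (nums, coords, cur) (i, d) = (nums, coords ++ [i], cur ++ [d]) from by
      simp [aStepN, hd, hne]]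
    have hlt' : i + 1 + (ds.length : Int) < n := by
      simp only [List.length_cons] at hlt; push_cast at hlt ⊢; omega
    rw [ih (fun c hc => hds c (List.mem_cons_of_mem _ hc)) (i + 1) hlt']
    rw [PySem.List.pyRange_one_cons
      (show i < i + ((d :: ds).length : Int) by simp only [List.length_cons]; push_cast; omega)]
    rw [show i + 1 + (ds.length : Int) = i + ((d :: ds).length : Int) from by
      push_cast [List.length_cons]; ring]
    simp

-- a nonempty digit run that reaches the end of the string gets flushed by the i == len-1 test
lemma aFoldN_run_last (n : Int) (ds : List Char) (hne : ds ≠ [])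
    (hds : ∀ c ∈ ds, PySem.Chars.isdigit c) (i : Int) (hend : i + ds.length = n)
    (nums : PySem.Dict String (List (List Int))) (coords : List Int) (cur : List Char) :
    ((PySem.List.enumerate ds i).foldl (aStepN n) (nums, coords, cur)).1 =
      nums.modify (String.ofList (cur ++ ds)) [] (· ++ [coords ++ PySem.List.pyRange i n 1]) := by
  rcases List.eq_nil_or_concat ds with h | ⟨ds', d, rfl⟩
  · exact absurd h hne
  simp only [List.concat_eq_append] at hds hend ⊢
  have hd : PySem.Chars.isdigit d := hds d (by simp)
  rw [PySem.List.enumerate_append, List.foldl_append]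
  rw [aFoldN_run n ds' (fun c hc => hds c (by simp [hc])) i
    (by simp only [List.length_append, List.length_cons, List.length_nil] at hend ⊢; push_cast at hend ⊢; omega)]
  simp only [PySem.List.enumerate_cons, PySem.List.enumerate_nil, List.foldl_cons, List.foldl_nil]
  have hlast : i + (ds'.length : Int) = n - 1 := by
    simp only [List.length_append, List.length_cons, List.length_nil] at hend; push_cast at hend; omega
  rw [show aStepN n (nums, coords ++ PySem.List.pyRange i (i + ds'.length) 1, cur ++ ds')
        ((i : Int) + ds'.length, d) =
      (nums.modify (String.ofList ((cur ++ ds') ++ [d])) []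
        (· ++ [(coords ++ PySem.List.pyRange i (i + ds'.length) 1) ++ [i + ds'.length]]),
       (coords ++ PySem.List.pyRange i (i + ds'.length) 1) ++ [i + ds'.length],
       (cur ++ ds') ++ [d]) from by simp [aStepN, hd, hlast]]
  have hr : PySem.List.pyRange i (i + (ds'.length : Int)) 1 ++ [i + (ds'.length : Int)] =
      PySem.List.pyRange i n 1 := by
    rw [← PySem.List.pyRange_one_succ_right (by omega : i ≤ i + (ds'.length : Int))]
    congr 1; omega
  simp [List.append_assoc, hr]

-- main invariant: from a clean state (no pending number), A's numbers fold equals B's run scan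
lemma aFoldN_eq_bNumsLoop (n : Int) (k : Nat) :
    ∀ (zs : List Char), zs.length ≤ k → ∀ (i : Nat) (nums : PySem.Dict String (List (List Int))),
      (i : Int) + zs.length = n →
      ((PySem.List.enumerate zs i).foldl (aStepN n) (nums, ([] : List Int), ([] : List Char))).1 =
        bNumsLoop nums zs i := by
  induction k with
  | zero =>
    intro zs hk i nums _
    rw [List.length_eq_zero_iff.mp (Nat.le_zero.mp hk), bNumsLoop_nil]
    rfl
  | succ k ih =>
    intro zs hk i nums hn
    match zs with
    | [] => rw [bNumsLoop_nil]; rfl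
    | c :: rest =>
      by_cases hd : PySem.Chars.isdigit c
      · -- a digit run starts here
        rw [bNumsLoop_cons_digit nums c rest i hd]
        set ds := (c :: rest).takeWhile PySem.Chars.isdigit with hds
        have hdsne : ds ≠ [] := by rw [hds, List.takeWhile_cons_of_pos hd]; simp
        have hdsdig : ∀ x ∈ ds, PySem.Chars.isdigit x := fun x hx => List.mem_takeWhile_imp hx
        rcases hrest' : (c :: rest).dropWhile PySem.Chars.isdigit with _ | ⟨c', rest''⟩
        · -- run reaches the end of the string
          have hsplit : ds = c :: rest := by
            rw [hds]
            conv_rhs => rw [← List.takeWhile_append_dropWhile (p := PySem.Chars.isdigit) (l := c :: rest)]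
            rw [hrest', List.append_nil]
          rw [bNumsLoop_nil]
          rw [hsplit]
          have hendn : (i : Int) + ((c :: rest).length : Int) = n := by exact_mod_cast hn
          rw [aFoldN_run_last n (c :: rest) (by simp) (hsplit ▸ hdsdig) i hendn nums [] []]
          have hb : (i : Int) + ((c :: rest).length : Int) = n := by exact_mod_cast hn
          rw [← hb]
          simp
        · -- run is followed by a non-digit c'
          have hsplit : ds ++ (c' :: rest'') = c :: rest := by
            rw [hds, ← hrest']
            exact List.takeWhile_append_dropWhile
          have hc' : PySem.Chars.isdigit c' = false := by
            have h1 : (c :: rest).dropWhile PySem.Chars.isdigit ≠ [] := by rw [hrest']; simp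
            have h2 := List.head_dropWhile_not PySem.Chars.isdigit h1
            rwa [show ((c :: rest).dropWhile PySem.Chars.isdigit).head h1 = c' from by
              simp [hrest']] at h2
          have hlens : ds.length + (rest''.length + 1) = rest.length + 1 := by
            have := congrArg List.length hsplit
            simpa using this
          rw [show (PySem.List.enumerate (c :: rest) (i : Int)) =
              PySem.List.enumerate ds i ++ PySem.List.enumerate (c' :: rest'') ((i : Int) + ds.length) from by
            rw [← hsplit, PySem.List.enumerate_append]]
          rw [List.foldl_append]
          have hrun : (i : Int) + (ds.length : Int) < n := by
            simp only [List.length_cons] at hn hlens; push_cast at hn ⊢; omega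
          rw [aFoldN_run n ds hdsdig i hrun nums [] []]
          simp only [PySem.List.enumerate_cons, List.foldl_cons]
          rw [show aStepN n (nums, [] ++ PySem.List.pyRange i (i + ds.length) 1, [] ++ ds)
                ((i : Int) + ds.length, c') =
              (nums.modify (String.ofList ds) []
                (· ++ [PySem.List.pyRange i (i + ds.length) 1]), ([] : List Int), ([] : List Char)) from by
            simp [aStepN, hc', hdsne]]
          rw [show (i : Int) + (ds.length : Int) + 1 = ((i + ds.length + 1 : Nat) : Int) from by push_cast; ring]
          have hk' : rest''.length ≤ k := by
            simp only [List.length_cons] at hk hlens; omega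
          have hn' : ((i + ds.length + 1 : Nat) : Int) + (rest''.length : Int) = n := by
            simp only [List.length_cons] at hn hlens; push_cast at hn ⊢; omega
          rw [ih rest'' hk' (i + ds.length + 1) _ hn']
          rw [bNumsLoop_cons_not _ c' rest'' _ (by simp [hc'])]
          rw [show (i : Int) + (ds.length : Int) + 1 = ((i + ds.length + 1 : Nat) : Int) from by push_cast; ring]
      · -- non-digit with nothing pending: both sides just step on
        simp only [PySem.List.enumerate_cons, List.foldl_cons]
        rw [show aStepN n (nums, ([] : List Int), ([] : List Char)) ((i : Int), c) =
            (nums, ([] : List Int), ([] : List Char)) from by simp [aStepN, hd]]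
        rw [show ((i : Int) + 1) = ((i + 1 : Nat) : Int) from by push_cast; ring]
        have hk' : rest.length ≤ k := by simp only [List.length_cons] at hk; omega
        have hn' : ((i + 1 : Nat) : Int) + (rest.length : Int) = n := by
          simp only [List.length_cons] at hn; push_cast at hn ⊢; omega
        rw [ih rest hk' (i + 1) nums hn']
        rw [bNumsLoop_cons_not _ c rest _ hd]
        norm_cast

-- ===== VERDICT (by name: the statement is the Claim_ definition above) =====
theorem element_finder_spec : Claim_equal_element_finder := by
  intro line _
  unfold Spec_element_finder element_finder element_finder_alt
  dsimp only
  rw [aFold_split]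
  have hnums := aFoldN_eq_bNumsLoop ((PySem.Chars.strip line.toList).length : Int)
    (PySem.Chars.strip line.toList).length (PySem.Chars.strip line.toList) le_rfl 0
    PySem.Dict.empty (by simp)
  simp only [Nat.cast_zero] at hnums
  rw [hnums]
  rfl
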